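-- pv_equiv track=rewrite | github.com/Real-PM/spindle | analysis/genre_normalize.py | _apply_hyphen_rules
-- ===== SOURCE A (Python) =====
-- HYPHEN_PREFIXES: set[str] = {
--     "acid",
--     "afro",
--     "alt",
--     "anti",
--     "art",
--     "avant",
--     "dark",
--     "dream",
--     "electro",
--     "euro",
--     "folk",
--     "garage",
--     "hard",
--     "hyper",
--     "indie",
--     "jazz",
--     "math",
--     "neo",
--     "noise",
--     "nu",
--     "post",
--     "power",
--     "pre",
--     "proto",
--     "psycho",
--     "slow",
--     "space",
--     "speed",
--     "stoner",
--     "synth",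
--     "trip",
-- }
--
-- def _apply_hyphen_rules(text: str) -> str:
--     """Apply hyphenation rules for compound genre names.
--
--     Words like "post punk" become "post-punk" based on HYPHEN_PREFIXES.
--     Already-hyphenated forms are preserved.
--     """
--     words = text.split()
--     if len(words) < 2:
--         return text
--
--     result = []
--     i = 0
--     while i < len(words):
--         word = words[i]
--         # Check if this word is a known prefix and there's a next word
--         if i + 1 < len(words) and word in HYPHEN_PREFIXES:
--             # Join with hyphen
--             result.append(f"{word}-{words[i + 1]}")
--             i += 2
--         else:
--             result.append(word)
--             i += 1
--
--     return " ".join(result)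
-- ===== SOURCE B (Python) =====
-- HYPHEN_PREFIXES: set[str] = {
--     "acid", "afro", "alt", "anti", "art", "avant", "dark", "dream",
--     "electro", "euro", "folk", "garage", "hard", "hyper", "indie",
--     "jazz", "math", "neo", "noise", "nu", "post", "power", "pre",
--     "proto", "psycho", "slow", "space", "speed", "stoner", "synth", "trip",
-- }
--
--
-- def _go(ws):
--     """Recursively hyphenate, building the output string directly."""
--     if not ws:
--         return ""
--     if len(ws) == 1:
--         return ws[0]
--     if ws[0] in HYPHEN_PREFIXES:
--         head, rest = ws[0] + "-" + ws[1], ws[2:]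
--     else:
--         head, rest = ws[0], ws[1:]
--     return head + " " + _go(rest) if rest else head
--
--
-- def _apply_hyphen_rules(text: str) -> str:
--     words = text.split()
--     if len(words) < 2:
--         return text
--     return _go(words)
-- ===== Notes on version B (the rewrite author's own statement) =====
-- stated objective: simpler
-- what changed: Replaces the index-based while loop that appends pieces to a result list and joins them at the end with a direct structural recursion over the word list that builds the output string as it goes, with no index arithmetic and no intermediate list.
import Mathlib
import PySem

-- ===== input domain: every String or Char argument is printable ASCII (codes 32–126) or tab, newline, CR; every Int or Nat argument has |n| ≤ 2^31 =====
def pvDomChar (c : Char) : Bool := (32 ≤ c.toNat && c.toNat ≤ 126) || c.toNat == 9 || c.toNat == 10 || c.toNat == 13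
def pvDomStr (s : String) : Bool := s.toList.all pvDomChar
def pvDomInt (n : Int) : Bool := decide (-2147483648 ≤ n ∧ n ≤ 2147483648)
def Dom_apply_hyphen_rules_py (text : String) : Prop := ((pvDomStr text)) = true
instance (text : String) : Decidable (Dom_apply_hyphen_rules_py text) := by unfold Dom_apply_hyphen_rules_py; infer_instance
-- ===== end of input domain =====

-- B replaces A's index-based while loop (append pieces to a list, join at the end) by a
-- direct structural recursion over the word list that builds the output string as it goes
-- (objective: simpler).

-- shared module constant HYPHEN_PREFIXES (a Python set)
def hyphenPrefixes : PySem.Set String := PySem.Set.ofList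
  ["acid", "afro", "alt", "anti", "art", "avant", "dark", "dream",
   "electro", "euro", "folk", "garage", "hard", "hyper", "indie",
   "jazz", "math", "neo", "noise", "nu", "post", "power", "pre",
   "proto", "psycho", "slow", "space", "speed", "stoner", "synth", "trip"]

-- ===== PORT A =====
-- the while loop: state = (result, i)
def hyphenLoopA (words : List String) (result : List String) (i : Nat) : List String :=
  if h : i < words.length then
    let word := words[i]
    if h2 : i + 1 < words.length ∧ word ∈ hyphenPrefixes then
      hyphenLoopA words (result ++ [word ++ "-" ++ words[i + 1]'h2.1]) (i + 2)
    else
      hyphenLoopA words (result ++ [word]) (i + 1)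
  else
    result
termination_by words.length - i

def apply_hyphen_rules_py (text : String) : String :=
  let words := PySem.Str.split₀ text
  if words.length < 2 then text
  else PySem.Str.join " " (hyphenLoopA words [] 0)

-- ===== PORT B =====
def hyphenGoB : List String → String
  | [] => ""
  | [w] => w
  | w :: w2 :: rest =>
    if w ∈ hyphenPrefixes then
      let head := w ++ "-" ++ w2
      if rest.isEmpty then head else head ++ " " ++ hyphenGoB rest
    else
      w ++ " " ++ hyphenGoB (w2 :: rest)

def apply_hyphen_rules_py_alt (text : String) : String :=
  let words := PySem.Str.split₀ text
  if words.length < 2 then text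
  else hyphenGoB words

-- ===== PRECONDITION & SPEC =====
def Spec_apply_hyphen_rules_py (text : String) (out : String) : Prop := out = apply_hyphen_rules_py_alt text
instance (text : String) (out : String) : Decidable (Spec_apply_hyphen_rules_py text out) := by unfold Spec_apply_hyphen_rules_py; infer_instance

-- ===== CLAIM (what is proved, stated in full; the proofs are below) =====
def Claim_equal_apply_hyphen_rules_py : Prop := ∀ (text : String), Dom_apply_hyphen_rules_py text → Spec_apply_hyphen_rules_py text (apply_hyphen_rules_py text)

-- ===== LEMMAS AND PROOFS =====

-- the list of pieces both programs produce, as a recursive function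
def hyphenPieces : List String → List String
  | [] => []
  | [w] => [w]
  | w :: w2 :: rest =>
    if w ∈ hyphenPrefixes then (w ++ "-" ++ w2) :: hyphenPieces rest
    else w :: hyphenPieces (w2 :: rest)

lemma hyphenPieces_ne_nil (ws : List String) (h : ws ≠ []) : hyphenPieces ws ≠ [] := by
  match ws with
  | [] => exact absurd rfl h
  | [w] => simp [hyphenPieces]
  | w :: w2 :: rest => simp [hyphenPieces]; split_ifs <;> simp

lemma join_cons_cons (x y : String) (ys : List String) :
    PySem.Str.join " " (x :: y :: ys) = x ++ " " ++ PySem.Str.join " " (y :: ys) := by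
  apply String.ext
  simp [PySem.Str.join, PySem.Chars.join_cons_cons]

lemma hyphenLoopA_eq (words : List String) (result : List String) (i : Nat) :
    hyphenLoopA words result i = result ++ hyphenPieces (words.drop i) := by
  fun_induction hyphenLoopA words result i with
  | case1 result i h word hcond ih =>
    rw [ih, List.drop_eq_getElem_cons h, List.drop_eq_getElem_cons hcond.1]
    simp [hyphenPieces, hcond.2, word]
  | case2 result i h word hne ih =>
    rw [ih, List.drop_eq_getElem_cons h]
    by_cases hlt : i + 1 < words.length
    · rw [List.drop_eq_getElem_cons hlt]
      have hmem : words[i] ∉ hyphenPrefixes := fun hm => hne ⟨hlt, hm⟩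
      simp [hyphenPieces, hmem, ← List.drop_eq_getElem_cons hlt, word]
    · have hnil : words.drop (i + 1) = [] := List.drop_eq_nil_of_le (by omega)
      simp [hnil, hyphenPieces, word]
  | case3 result i h =>
    have hnil : words.drop i = [] := List.drop_eq_nil_of_le (by omega)
    simp [hnil, hyphenPieces]

lemma hyphenGoB_eq (ws : List String) : hyphenGoB ws = PySem.Str.join " " (hyphenPieces ws) := by
  fun_induction hyphenGoB ws with
  | case1 =>
    apply String.ext
    simp [hyphenPieces, PySem.Str.join, PySem.Chars.join, List.intercalate]
  | case2 w =>
    apply String.ext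
    simp [hyphenPieces, PySem.Str.join, PySem.Chars.join, List.intercalate]
  | case3 w w2 rest hmem head hempty =>
    have hrest : rest = [] := by simpa using hempty
    subst hrest
    apply String.ext
    simp [hmem, hyphenPieces, PySem.Str.join, PySem.Chars.join, List.intercalate, head]
  | case4 w w2 rest hmem head hne ih =>
    obtain ⟨y, ys, hys⟩ := List.exists_cons_of_ne_nil
      (hyphenPieces_ne_nil rest (by simpa using hne))
    simp only [hyphenPieces, if_pos hmem]
    rw [hys, join_cons_cons, ← hys, ih]
  | case5 w w2 rest hmem ih =>
    obtain ⟨y, ys, hys⟩ := List.exists_cons_of_ne_nil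
      (hyphenPieces_ne_nil (w2 :: rest) (by simp))
    simp only [hyphenPieces, if_neg hmem]
    rw [hys, join_cons_cons, ← hys, ih]

-- ===== VERDICT (by name: the statement is the Claim_ definition above) =====
theorem apply_hyphen_rules_py_spec : Claim_equal_apply_hyphen_rules_py := by
  intro text _
  unfold Spec_apply_hyphen_rules_py apply_hyphen_rules_py apply_hyphen_rules_py_alt
  simp only
  split_ifs with h
  · rfl
  · rw [hyphenLoopA_eq, hyphenGoB_eq]
    simp
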